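-- pv_equiv track=rewrite | github.com/Geetha-kuncha/pdf-outline-extractor | pdf-outline-extractor/src/text_analyzer.py | _apply_systematic_undoubling_advanced
-- ===== SOURCE A (Python) =====
-- def _apply_systematic_undoubling_advanced(text: str) -> str:
--     """Apply advanced systematic undoubling"""
--     result = []
--     i = 0
--
--     while i < len(text):
--         char = text[i]
--
--         # If current char equals next char and both are letters
--         if (i + 1 < len(text) and
--             text[i] == text[i + 1] and
--             char.isalpha()):
--             result.append(char)
--             i += 2  # Skip both doubled characters
--         else:
--             result.append(char)
--             i += 1
--
--     return ''.join(result)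
-- ===== SOURCE B (Python) =====
-- def _apply_systematic_undoubling_advanced(text: str) -> str:
--     """Run-length decomposition: for each maximal run of k equal characters,
--     emit ceil(k/2) copies if the character is alphabetic, else k copies."""
--     out = []
--     i = 0
--     n = len(text)
--     while i < n:
--         c = text[i]
--         j = i
--         while j < n and text[j] == c:
--             j += 1
--         k = j - i
--         out.append(c * ((k + 1) // 2 if c.isalpha() else k))
--         i = j
--     return ''.join(out)
-- ===== Notes on version B (the rewrite author's own statement) =====
-- stated objective: alternative
-- what changed: Replaced A's per-character pair-skip scan (compare text[i] with text[i+1], advance by 1 or 2) by a run-length decomposition: find each maximal run of equal characters and emit ceil(k/2) copies arithmetically for an alphabetic run of length k, k copies otherwise.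
import Mathlib
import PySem

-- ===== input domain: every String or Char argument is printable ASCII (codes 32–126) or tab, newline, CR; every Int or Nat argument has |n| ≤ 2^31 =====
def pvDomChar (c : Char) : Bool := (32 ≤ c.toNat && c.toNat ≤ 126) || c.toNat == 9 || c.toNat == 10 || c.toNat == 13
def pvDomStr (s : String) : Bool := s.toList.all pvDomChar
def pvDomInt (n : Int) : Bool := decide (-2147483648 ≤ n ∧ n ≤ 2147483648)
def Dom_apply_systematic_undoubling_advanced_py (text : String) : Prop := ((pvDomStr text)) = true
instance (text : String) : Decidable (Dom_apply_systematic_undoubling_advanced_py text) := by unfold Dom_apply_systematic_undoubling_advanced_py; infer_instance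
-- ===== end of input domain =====

-- B replaces A's pair-skip scan by a run-length decomposition: each maximal run of k equal
-- characters is emitted as ceil(k/2) copies if alphabetic, k copies otherwise (objective: alternative).


-- ===== PORT A =====
-- A's while loop: index i, lookahead text[i+1], append and skip 1 or 2.
def pvAGo (l : List Char) (i : Nat) (result : List Char) : List Char :=
  if _h : i < l.length then
    let char := l.getD i default
    if decide (i + 1 < l.length) && (l.getD i default == l.getD (i + 1) default)
        && PySem.Chars.isalpha char then
      pvAGo l (i + 2) (result ++ [char])
    else
      pvAGo l (i + 1) (result ++ [char])
  else
    result
termination_by l.length - i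
decreasing_by all_goals omega

def apply_systematic_undoubling_advanced_py (text : String) : String :=
  String.ofList (pvAGo text.toList 0 [])

-- ===== PORT B =====
-- Source B's inner while loop: advance j while text[j] == c.
def pvRunEnd (l : List Char) (c : Char) (j : Nat) : Nat :=
  if _h : j < l.length ∧ l.getD j default == c then pvRunEnd l c (j + 1) else j
termination_by l.length - j
decreasing_by omega

-- cited by pvBGo's decreasing_by: the run end is strictly past i.
theorem pvRunEnd_ge (l : List Char) (c : Char) : ∀ (n j : Nat), l.length - j ≤ n → j ≤ pvRunEnd l c j := by
  intro n
  induction n with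
  | zero =>
    intro j hj
    rw [pvRunEnd]
    split
    · next h => exact absurd h.1 (by omega)
    · exact le_rfl
  | succ n ih =>
    intro j hj
    rw [pvRunEnd]
    split
    · next h => exact le_trans (by omega) (ih (j + 1) (by omega))
    · exact le_rfl

theorem pvRunEnd_gt (l : List Char) (c : Char) (i : Nat)
    (h1 : i < l.length) (h2 : l.getD i default = c) : i + 1 ≤ pvRunEnd l c i := by
  rw [pvRunEnd, dif_pos ⟨h1, by rw [h2]; simp⟩]
  exact pvRunEnd_ge l c l.length (i + 1) (by omega)

-- Source B's outer while loop: one maximal run per step, emitted by arithmetic.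
def pvBGo (l : List Char) (i : Nat) (out : List Char) : List Char :=
  if _h : i < l.length then
    let c := l.getD i default
    let j := pvRunEnd l c i
    let k := j - i
    pvBGo l j (out ++ List.replicate (if PySem.Chars.isalpha c then (k + 1) / 2 else k) c)
  else out
termination_by l.length - i
decreasing_by
  have := pvRunEnd_gt l (l.getD i default) i _h rfl
  omega

def apply_systematic_undoubling_advanced_py_alt (text : String) : String :=
  String.ofList (pvBGo text.toList 0 [])

-- ===== PRECONDITION & SPEC =====
def Spec_apply_systematic_undoubling_advanced_py (text : String) (out : String) : Prop := out = apply_systematic_undoubling_advanced_py_alt text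
instance (text : String) (out : String) : Decidable (Spec_apply_systematic_undoubling_advanced_py text out) := by unfold Spec_apply_systematic_undoubling_advanced_py; infer_instance

-- ===== CLAIM (what is proved, stated in full; the proofs are below) =====
def Claim_equal_apply_systematic_undoubling_advanced_py : Prop := ∀ (text : String), Dom_apply_systematic_undoubling_advanced_py text → Spec_apply_systematic_undoubling_advanced_py text (apply_systematic_undoubling_advanced_py text)

-- ===== LEMMAS AND PROOFS =====

-- Reference recursion both ports are reduced to.
def pvF : List Char → List Char
  | [] => []
  | [c] => [c]
  | c1 :: c2 :: rest =>
    if c1 == c2 && PySem.Chars.isalpha c1 then c1 :: pvF rest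
    else c1 :: pvF (c2 :: rest)

theorem pvAGo_eq (n : Nat) : ∀ (l : List Char) (i : Nat), l.length - i ≤ n →
    ∀ res, pvAGo l i res = res ++ pvF (l.drop i) := by
  induction n with
  | zero =>
    intro l i hn res
    rw [pvAGo]
    have hi : ¬ i < l.length := by omega
    simp [hi, List.drop_eq_nil_of_le (by omega : l.length ≤ i), pvF]
  | succ n ih =>
    intro l i hn res
    rw [pvAGo]
    by_cases hi : i < l.length
    · simp only [hi, dif_pos]
      have hdrop : l.drop i = l[i] :: l.drop (i + 1) := List.drop_eq_getElem_cons hi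
      have hgd : l.getD i default = l[i] := List.getD_eq_getElem l default hi
      by_cases h1 : i + 1 < l.length
      · have hdrop1 : l.drop (i + 1) = l[i + 1] :: l.drop (i + 2) := List.drop_eq_getElem_cons h1
        have hgd1 : l.getD (i + 1) default = l[i + 1] := List.getD_eq_getElem l default h1
        rw [hgd, hgd1, hdrop, hdrop1, pvF]
        by_cases heq : (l[i] == l[i + 1] && PySem.Chars.isalpha l[i]) = true
        · rw [if_pos (by simpa [h1, Bool.and_assoc] using heq),
              if_pos heq, ih l (i + 2) (by omega)]
          simp
        · rw [if_neg (by simpa [h1, Bool.and_assoc] using heq),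
              if_neg heq, ih l (i + 1) (by omega), hdrop1]
          simp
      · have hnil : l.drop (i + 1) = ([] : List Char) := List.drop_eq_nil_of_le (by omega)
        rw [hgd, hdrop, hnil, pvF]
        rw [if_neg (by simp [h1]), ih l (i + 1) (by omega), hnil, pvF]
        simp
    · simp [hi, List.drop_eq_nil_of_le (by omega : l.length ≤ i), pvF]

-- pvRunEnd computed as i + length of the run starting at i.
theorem pvRunEnd_eq (n : Nat) : ∀ (l : List Char) (c : Char) (j : Nat), l.length - j ≤ n →
    pvRunEnd l c j = j + ((l.drop j).takeWhile (· == c)).length := by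
  induction n with
  | zero =>
    intro l c j hn
    rw [pvRunEnd]
    have hj : ¬ j < l.length := by omega
    rw [dif_neg (by omega)]
    simp [List.drop_eq_nil_of_le (by omega : l.length ≤ j)]
  | succ n ih =>
    intro l c j hn
    rw [pvRunEnd]
    by_cases hj : j < l.length
    · have hdrop : l.drop j = l[j] :: l.drop (j + 1) := List.drop_eq_getElem_cons hj
      have hgd : l.getD j default = l[j] := List.getD_eq_getElem l default hj
      by_cases hc : (l[j] == c) = true
      · rw [dif_pos ⟨hj, by rw [hgd]; exact hc⟩, ih l c (j + 1) (by omega), hdrop,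
            List.takeWhile_cons, if_pos hc]
        simp; omega
      · rw [dif_neg (by rw [hgd]; exact fun h => hc h.2), hdrop, List.takeWhile_cons, if_neg hc]
        simp
    · rw [dif_neg (by omega)]
      simp [List.drop_eq_nil_of_le (by omega : l.length ≤ j)]

theorem pvHeadDropWhile (p : Char → Bool) : ∀ (l : List Char) (a : Char),
    (l.dropWhile p).head? = some a → p a = false := by
  intro l
  induction l with
  | nil => intro a h; simp at h
  | cons x xs ih =>
    intro a h
    rw [List.dropWhile_cons] at h
    by_cases hx : p x = true
    · exact ih a (by simpa [hx] using h)
    · simp [hx] at h; subst h; simpa using hx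

-- pvF on a maximal alphabetic run: ceil(k/2) copies.
theorem pvF_run_alpha (c : Char) (hc : PySem.Chars.isalpha c = true) :
    ∀ k (rest : List Char), (∀ d, rest.head? = some d → (d == c) = false) →
      pvF (List.replicate k c ++ rest) = List.replicate ((k + 1) / 2) c ++ pvF rest := by
  intro k
  induction k using Nat.twoStepInduction with
  | zero => intro rest _; simp
  | one =>
    intro rest hrest
    cases rest with
    | nil => simp [pvF]
    | cons d r =>
      have hd : (d == c) = false := hrest d rfl
      have hcd : (c == d) = false := by
        cases hh : c == d with
        | false => rfl
        | true => exact absurd hd (by rw [eq_of_beq hh]; simp)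
      simp [pvF, hcd]
  | more k ih _ =>
    intro rest hrest
    have : List.replicate (k + 2) c ++ rest = c :: c :: (List.replicate k c ++ rest) := by
      simp [List.replicate_succ]
    rw [this, pvF, if_pos (by simp [hc]), ih rest hrest]
    have h2 : (k + 2 + 1) / 2 = (k + 1) / 2 + 1 := by omega
    rw [h2, List.replicate_succ]
    simp

-- pvF on a maximal non-alphabetic run: unchanged.
theorem pvF_run_nonalpha (c : Char) (hc : PySem.Chars.isalpha c = false) :
    ∀ k (rest : List Char), (∀ d, rest.head? = some d → (d == c) = false) →
      pvF (List.replicate k c ++ rest) = List.replicate k c ++ pvF rest := by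
  intro k
  induction k using Nat.twoStepInduction with
  | zero => intro rest _; simp
  | one =>
    intro rest hrest
    cases rest with
    | nil => simp [pvF]
    | cons d r =>
      have hd : (d == c) = false := hrest d rfl
      have hcd : (c == d) = false := by
        cases hh : c == d with
        | false => rfl
        | true => exact absurd hd (by rw [eq_of_beq hh]; simp)
      simp [pvF, hcd]
  | more k _ ih1 =>
    intro rest hrest
    have he : List.replicate (k + 2) c ++ rest = c :: (List.replicate (k + 1) c ++ rest) := by
      simp [List.replicate_succ]
    have he2 : List.replicate (k + 1) c ++ rest = c :: (List.replicate k c ++ rest) := by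
      simp [List.replicate_succ]
    rw [he, he2, pvF, if_neg (by simp [hc]), ← he2, ih1 rest hrest]
    simp [List.replicate_succ]

theorem pvBGo_eq (n : Nat) : ∀ (l : List Char) (i : Nat), l.length - i ≤ n →
    ∀ out, pvBGo l i out = out ++ pvF (l.drop i) := by
  induction n with
  | zero =>
    intro l i hn out
    rw [pvBGo]
    have hi : ¬ i < l.length := by omega
    simp [hi, List.drop_eq_nil_of_le (by omega : l.length ≤ i), pvF]
  | succ n ih =>
    intro l i hn out
    rw [pvBGo]
    by_cases hi : i < l.length
    · simp only [hi, dif_pos]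
      set c := l.getD i default with hc
      set t := ((l.drop i).takeWhile (· == c)).length with ht
      have hre : pvRunEnd l c i = i + t := pvRunEnd_eq (l.length - i) l c i le_rfl
      have hdropi : l.drop i = c :: l.drop (i + 1) := by
        rw [List.drop_eq_getElem_cons hi, hc, List.getD_eq_getElem l default hi]
      have ht1 : 1 ≤ t := by
        rw [ht, hdropi, List.takeWhile_cons, if_pos (by simp)]
        simp
      have htw : (l.drop i).takeWhile (· == c) = List.replicate t c := by
        rw [List.eq_replicate_iff]
        exact ⟨rfl, fun b hb => by
          have := List.mem_takeWhile_imp hb; simpa using this⟩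
      have hsplit : l.drop i = List.replicate t c ++ (l.drop i).dropWhile (· == c) := by
        rw [← htw, List.takeWhile_append_dropWhile]
      have hdw : (l.drop i).dropWhile (· == c) = l.drop (i + t) := by
        have h1 : l.drop (i + t) = (l.drop i).drop t := by
          rw [List.drop_drop, Nat.add_comm]
        rw [h1]
        conv_rhs => rw [hsplit]
        rw [List.drop_left' (by simp)]
      have hhead : ∀ d, (l.drop (i + t)).head? = some d → (d == c) = false := by
        intro d hd
        rw [← hdw] at hd
        exact pvHeadDropWhile (· == c) (l.drop i) d hd
      have hpf : pvF (l.drop i)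
          = List.replicate (if PySem.Chars.isalpha c then (t + 1) / 2 else t) c
            ++ pvF (l.drop (i + t)) := by
        by_cases ha : PySem.Chars.isalpha c = true
        · rw [if_pos ha]
          conv_lhs => rw [hsplit, hdw]
          exact pvF_run_alpha c ha t _ hhead
        · rw [if_neg ha]
          conv_lhs => rw [hsplit, hdw]
          exact pvF_run_nonalpha c (by simpa using ha) t _ hhead
      rw [hre]
      have hk : i + t - i = t := by omega
      rw [hk, ih l (i + t) (by omega), hpf]
      simp
    · simp [hi, List.drop_eq_nil_of_le (by omega : l.length ≤ i), pvF]

-- ===== VERDICT (by name: the statement is the Claim_ definition above) =====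
theorem apply_systematic_undoubling_advanced_py_spec : Claim_equal_apply_systematic_undoubling_advanced_py := by
  intro text _
  unfold Spec_apply_systematic_undoubling_advanced_py
  unfold apply_systematic_undoubling_advanced_py apply_systematic_undoubling_advanced_py_alt
  rw [pvAGo_eq text.toList.length text.toList 0 (by omega) [],
      pvBGo_eq text.toList.length text.toList 0 (by omega) []]
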